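-- pv_equiv track=rewrite | github.com/SeongcheolJeong/hybrid-sensor-sim | src/hybrid_sensor_sim/tools/renderer_backend_local_setup.py | _extract_architectures_from_file_description
-- ===== SOURCE A (Python) =====
-- def _extract_architectures_from_file_description(description: str) -> list[str]:
--     lowered = description.lower()
--     architectures: list[str] = []
--     for token, normalized in (
--         ("arm64", "arm64"),
--         ("aarch64", "arm64"),
--         ("x86_64", "x86_64"),
--         ("x86-64", "x86_64"),
--         ("i386", "x86"),
--         ("80386", "x86"),
--     ):
--         if token in lowered and normalized not in architectures:
--             architectures.append(normalized)
--     return architectures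
-- ===== SOURCE B (Python) =====
-- _ALIASES = (
--     ("arm64", "arm64"),
--     ("aarch64", "arm64"),
--     ("x86_64", "x86_64"),
--     ("x86-64", "x86_64"),
--     ("i386", "x86"),
--     ("80386", "x86"),
-- )
--
--
-- def _extract_architectures_from_file_description(description: str) -> list[str]:
--     lowered = description.lower()
--     found = set()
--     for i in range(len(lowered)):
--         for token, normalized in _ALIASES:
--             if lowered.startswith(token, i):
--                 found.add(normalized)
--     return [arch for arch in ("arm64", "x86_64", "x86") if arch in found]
-- ===== Notes on version B (the rewrite author's own statement) =====
-- stated objective: alternative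
-- what changed: Instead of running six independent full-string substring scans and deduplicating by searching the output list, B makes a single left-to-right sweep over the string positions, at each position testing which alias starts there and accumulating the matched normalized labels in a set, then emits the canonical labels in fixed order filtered by set membership.
import Mathlib
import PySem

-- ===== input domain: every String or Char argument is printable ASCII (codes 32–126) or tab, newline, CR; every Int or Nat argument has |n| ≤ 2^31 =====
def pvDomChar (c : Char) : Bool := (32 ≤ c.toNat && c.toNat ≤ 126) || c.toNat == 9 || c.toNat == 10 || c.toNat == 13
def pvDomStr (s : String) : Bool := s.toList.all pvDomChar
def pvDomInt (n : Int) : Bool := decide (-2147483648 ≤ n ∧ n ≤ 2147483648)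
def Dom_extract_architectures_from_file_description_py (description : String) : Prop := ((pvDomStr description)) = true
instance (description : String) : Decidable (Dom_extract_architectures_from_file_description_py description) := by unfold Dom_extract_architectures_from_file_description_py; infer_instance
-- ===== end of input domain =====

-- B replaces A's six full substring scans + in-list dedup by one left-to-right sweep over the
-- string positions collecting matched labels into a set, then an ordered filter (objective: alternative).


-- ===== PORT A =====
-- literal port of A: flat (token, normalized) loop with a 'not in' dedup check
def extract_architectures_from_file_description_py (description : String) : List String :=
  let lowered := PySem.Str.lower description
  (([("arm64", "arm64"), ("aarch64", "arm64"), ("x86_64", "x86_64"),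
     ("x86-64", "x86_64"), ("i386", "x86"), ("80386", "x86")] : List (String × String)).foldl
    (fun architectures p =>
      if PySem.Str.isIn p.1 lowered && !(architectures.contains p.2) then
        architectures ++ [p.2]
      else architectures)
    ([] : List String))

-- ===== PORT B =====
-- the module-level alias table of Source B
def pvAliases : List (String × String) :=
  [("arm64", "arm64"), ("aarch64", "arm64"), ("x86_64", "x86_64"),
   ("x86-64", "x86_64"), ("i386", "x86"), ("80386", "x86")]

-- port of B: single sweep over string positions (lowered.startswith(token, i) = startswith on drop i),
-- collecting labels into a set, then an ordered membership filter
def extract_architectures_from_file_description_py_alt (description : String) : List String :=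
  let lowered := (PySem.Str.lower description).toList
  let found : PySem.Set String :=
    (List.range lowered.length).foldl
      (fun found i =>
        pvAliases.foldl
          (fun found p =>
            if PySem.Chars.startswith (lowered.drop i) p.1.toList then
              PySem.Set.add found p.2
            else found)
          found)
      PySem.Set.empty
  (["arm64", "x86_64", "x86"] : List String).filter (fun arch => PySem.Set.contains found arch)

-- ===== PRECONDITION & SPEC =====
def Spec_extract_architectures_from_file_description_py (description : String) (out : List String) : Prop := out = extract_architectures_from_file_description_py_alt description
instance (description : String) (out : List String) : Decidable (Spec_extract_architectures_from_file_description_py description out) := by unfold Spec_extract_architectures_from_file_description_py; infer_instance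

-- ===== CLAIM (what is proved, stated in full; the proofs are below) =====
def Claim_equal_extract_architectures_from_file_description_py : Prop := ∀ (description : String), Dom_extract_architectures_from_file_description_py description → Spec_extract_architectures_from_file_description_py description (extract_architectures_from_file_description_py description)

-- ===== LEMMAS AND PROOFS =====

-- membership in a fold of conditional Set.add's
theorem pv_mem_foldl_condAdd {β : Type} (l : List β) (acc : PySem.Set String)
    (c : β → Bool) (f : β → String) (x : String) :
    x ∈ l.foldl (fun a b => if c b then PySem.Set.add a (f b) else a) acc ↔
      ((∃ b ∈ l, c b = true ∧ f b = x) ∨ x ∈ acc) := by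
  induction l generalizing acc with
  | nil => simp
  | cons b t ih =>
    simp only [List.foldl_cons, ih, List.mem_cons]
    by_cases hb : c b = true
    · simp only [if_pos hb, PySem.Set.mem_add]
      constructor
      · rintro (⟨b', hb', h⟩ | h | rfl)
        · exact Or.inl ⟨b', Or.inr hb', h⟩
        · exact Or.inr h
        · exact Or.inl ⟨b, Or.inl rfl, hb, rfl⟩
      · rintro (⟨b', (rfl | hb'), hc, hf⟩ | h)
        · exact Or.inr (Or.inr hf.symm)
        · exact Or.inl ⟨b', hb', hc, hf⟩
        · exact Or.inr (Or.inl h)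
    · simp [hb]

-- nested sweep membership: x is found iff some alias pair matches at some position
theorem pv_mem_sweep (s : List Char) (x : String) :
    x ∈ (List.range s.length).foldl
        (fun found i =>
          pvAliases.foldl
            (fun found p =>
              if PySem.Chars.startswith (s.drop i) p.1.toList then PySem.Set.add found p.2
              else found)
            found)
        PySem.Set.empty ↔
      (∃ i ∈ List.range s.length, ∃ p ∈ pvAliases,
        PySem.Chars.startswith (s.drop i) p.1.toList = true ∧ p.2 = x) := by
  have main : ∀ (l : List Nat) (acc : PySem.Set String),
      x ∈ l.foldl
          (fun found i =>
            pvAliases.foldl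
              (fun found p =>
                if PySem.Chars.startswith (s.drop i) p.1.toList then PySem.Set.add found p.2
                else found)
              found)
          acc ↔
        ((∃ i ∈ l, ∃ p ∈ pvAliases,
            PySem.Chars.startswith (s.drop i) p.1.toList = true ∧ p.2 = x) ∨ x ∈ acc) := by
    intro l
    induction l with
    | nil => simp
    | cons i t ih =>
      intro acc
      simp only [List.foldl_cons, ih, List.mem_cons]
      rw [pv_mem_foldl_condAdd]
      constructor
      · rintro (⟨j, hj, hp⟩ | (⟨p, hp, hc, hf⟩ | h))
        · exact Or.inl ⟨j, Or.inr hj, hp⟩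
        · exact Or.inl ⟨i, Or.inl rfl, p, hp, hc, hf⟩
        · exact Or.inr h
      · rintro (⟨j, (rfl | hj), p, hp, hc, hf⟩ | h)
        · exact Or.inr (Or.inl ⟨p, hp, hc, hf⟩)
        · exact Or.inl ⟨j, hj, p, hp, hc, hf⟩
        · exact Or.inr (Or.inr h)
  rw [main]
  simp [PySem.Set.empty]

-- a nonempty token starts at some scanned position iff it is a substring
theorem pv_exists_start_iff_isIn (s t : List Char) (ht : t ≠ []) :
    (∃ i ∈ List.range s.length, PySem.Chars.startswith (s.drop i) t = true) ↔
      PySem.Chars.isIn t s = true := by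
  rw [← PySem.Chars.exists_prefix_drop_iff_isIn]
  constructor
  · rintro ⟨i, _, hi⟩
    exact ⟨i, (PySem.Chars.startswith_iff _ _).mp hi⟩
  · rintro ⟨j, hj⟩
    by_cases hjl : j < s.length
    · exact ⟨j, List.mem_range.mpr hjl, (PySem.Chars.startswith_iff _ _).mpr hj⟩
    · exfalso
      have hnil : s.drop j = [] := List.drop_eq_nil_of_le (le_of_not_gt hjl)
      rw [hnil, List.prefix_nil] at hj
      exact ht hj

-- the sweep finds exactly the labels one of whose aliases occurs in the string
theorem pv_found_label (s : List Char) (x : String) :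
    x ∈ (List.range s.length).foldl
        (fun found i =>
          pvAliases.foldl
            (fun found p =>
              if PySem.Chars.startswith (s.drop i) p.1.toList then PySem.Set.add found p.2
              else found)
            found)
        PySem.Set.empty ↔
      (∃ p ∈ pvAliases, PySem.Chars.isIn p.1.toList s = true ∧ p.2 = x) := by
  rw [pv_mem_sweep]
  constructor
  · rintro ⟨i, hi, p, hp, hc, hf⟩
    refine ⟨p, hp, ?_, hf⟩
    have ht : p.1.toList ≠ [] := by fin_cases hp <;> decide
    exact (pv_exists_start_iff_isIn s p.1.toList ht).mp ⟨i, hi, hc⟩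
  · rintro ⟨p, hp, hc, hf⟩
    have ht : p.1.toList ≠ [] := by fin_cases hp <;> decide
    obtain ⟨i, hi, hsw⟩ := (pv_exists_start_iff_isIn s p.1.toList ht).mpr hc
    exact ⟨i, hi, p, hp, hsw, hf⟩

-- ===== VERDICT (by name: the statement is the Claim_ definition above) =====
theorem extract_architectures_from_file_description_py_spec : Claim_equal_extract_architectures_from_file_description_py := by
  intro description _
  unfold Spec_extract_architectures_from_file_description_py
  unfold extract_architectures_from_file_description_py extract_architectures_from_file_description_py_alt
  simp only
  set s := (PySem.Str.lower description).toList with hs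
  set F : PySem.Set String :=
    (List.range s.length).foldl
      (fun found i =>
        pvAliases.foldl
          (fun found p =>
            if PySem.Chars.startswith (s.drop i) p.1.toList then PySem.Set.add found p.2
            else found)
          found)
      PySem.Set.empty with hF
  have harm := pv_found_label s "arm64"
  have hx64 := pv_found_label s "x86_64"
  have hx86 := pv_found_label s "x86"
  rw [← hF] at harm hx64 hx86
  simp only [pvAliases, List.mem_cons, List.not_mem_nil, or_false] at harm hx64 hx86
  have c1 : PySem.Set.contains F "arm64" =
      (PySem.Chars.isIn ['a','r','m','6','4'] s || PySem.Chars.isIn ['a','a','r','c','h','6','4'] s) := by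
    rw [Bool.eq_iff_iff]
    simp only [PySem.Set.contains, List.contains_iff_mem, harm, Bool.or_eq_true]
    constructor
    · rintro ⟨p, (rfl | rfl | rfl | rfl | rfl | rfl), hin, hn⟩
      · exact Or.inl hin
      · exact Or.inr hin
      · exact absurd hn (by decide)
      · exact absurd hn (by decide)
      · exact absurd hn (by decide)
      · exact absurd hn (by decide)
    · rintro (h | h)
      · exact ⟨("arm64", "arm64"), Or.inl rfl, h, rfl⟩
      · exact ⟨("aarch64", "arm64"), Or.inr (Or.inl rfl), h, rfl⟩
  have c2 : PySem.Set.contains F "x86_64" =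
      (PySem.Chars.isIn ['x','8','6','_','6','4'] s || PySem.Chars.isIn ['x','8','6','-','6','4'] s) := by
    rw [Bool.eq_iff_iff]
    simp only [PySem.Set.contains, List.contains_iff_mem, hx64, Bool.or_eq_true]
    constructor
    · rintro ⟨p, (rfl | rfl | rfl | rfl | rfl | rfl), hin, hn⟩
      · exact absurd hn (by decide)
      · exact absurd hn (by decide)
      · exact Or.inl hin
      · exact Or.inr hin
      · exact absurd hn (by decide)
      · exact absurd hn (by decide)
    · rintro (h | h)
      · exact ⟨("x86_64", "x86_64"), Or.inr (Or.inr (Or.inl rfl)), h, rfl⟩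
      · exact ⟨("x86-64", "x86_64"), Or.inr (Or.inr (Or.inr (Or.inl rfl))), h, rfl⟩
  have c3 : PySem.Set.contains F "x86" =
      (PySem.Chars.isIn ['i','3','8','6'] s || PySem.Chars.isIn ['8','0','3','8','6'] s) := by
    rw [Bool.eq_iff_iff]
    simp only [PySem.Set.contains, List.contains_iff_mem, hx86, Bool.or_eq_true]
    constructor
    · rintro ⟨p, (rfl | rfl | rfl | rfl | rfl | rfl), hin, hn⟩
      · exact absurd hn (by decide)
      · exact absurd hn (by decide)
      · exact absurd hn (by decide)
      · exact absurd hn (by decide)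
      · exact Or.inl hin
      · exact Or.inr hin
    · rintro (h | h)
      · exact ⟨("i386", "x86"), Or.inr (Or.inr (Or.inr (Or.inr (Or.inl rfl)))), h, rfl⟩
      · exact ⟨("80386", "x86"), Or.inr (Or.inr (Or.inr (Or.inr (Or.inr rfl)))), h, rfl⟩
  simp only [List.filter_cons, List.filter_nil, c1, c2, c3,
    List.foldl_cons, List.foldl_nil, PySem.Str.isIn_eq, ← hs]
  rcases Bool.dichotomy (PySem.Chars.isIn ['a','r','m','6','4'] s) with h1 | h1 <;>
    rcases Bool.dichotomy (PySem.Chars.isIn ['a','a','r','c','h','6','4'] s) with h2 | h2 <;>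
    rcases Bool.dichotomy (PySem.Chars.isIn ['x','8','6','_','6','4'] s) with h3 | h3 <;>
    rcases Bool.dichotomy (PySem.Chars.isIn ['x','8','6','-','6','4'] s) with h4 | h4 <;>
    rcases Bool.dichotomy (PySem.Chars.isIn ['i','3','8','6'] s) with h5 | h5 <;>
    rcases Bool.dichotomy (PySem.Chars.isIn ['8','0','3','8','6'] s) with h6 | h6 <;>
    simp [h1, h2, h3, h4, h5, h6]
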